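-- pv_equiv track=rewrite | github.com/Zimmermann25/InterviewBit | Hashing/Python/AnIncrementProblem.py | solve
-- ===== SOURCE A (Python) =====
-- def solve(A):
--     # chyba nawet bez dodatkowej tablicy output mozna to zrobic
--     output = [None] * (len(A))
--     for i in range(len(A)):
--         j = 0
--         while j < i:
--             if A[i] == output[j]:
--                 output[j] +=1
--                 break
--             j+=1
--         output[i] = A[i]
--
--     return output
-- ===== SOURCE B (Python) =====
-- def solve(A):
--     # Single pass with a dict mapping current value -> bucket (list of output
--     # positions currently holding that value); the first earlier equal entry is
--     # the minimum position in the bucket.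
--     output = []
--     buckets = {}
--     for i, v in enumerate(A):
--         idxs = buckets.get(v)
--         if idxs:
--             j = min(idxs)
--             idxs.remove(j)
--             output[j] += 1
--             buckets.setdefault(v + 1, []).append(j)
--         output.append(v)
--         buckets.setdefault(v, []).append(i)
--     return output
-- ===== Notes on version B (the rewrite author's own statement) =====
-- stated objective: faster
-- what changed: Replaces A's inner rescan of all earlier output entries by a single pass keeping a dict from current value to the bucket of output positions holding it, so each element only takes/updates the minimum of one small bucket.
import Mathlib
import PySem

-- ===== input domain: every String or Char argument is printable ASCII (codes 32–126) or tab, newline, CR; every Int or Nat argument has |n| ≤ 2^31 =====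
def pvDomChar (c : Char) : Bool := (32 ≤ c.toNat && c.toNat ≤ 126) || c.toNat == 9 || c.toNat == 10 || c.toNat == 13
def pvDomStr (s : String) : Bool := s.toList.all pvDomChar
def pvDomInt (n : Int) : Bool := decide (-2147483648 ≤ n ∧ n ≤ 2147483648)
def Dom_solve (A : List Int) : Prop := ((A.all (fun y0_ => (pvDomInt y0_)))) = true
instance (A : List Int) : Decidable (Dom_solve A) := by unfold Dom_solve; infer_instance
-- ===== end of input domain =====

-- B replaces A's quadratic rescan of earlier output entries by a one-pass dict
-- from current value to the bucket of output positions holding it (faster).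


-- ===== PORT A =====
-- A's inner `while j < i` scan of output[0..i-1], incrementing the first entry
-- equal to A[i] and breaking; recursive form of that scan.
def pvIncFirst : List Int → Int → List Int
  | [], _ => []
  | x :: xs, v => if x = v then (x + 1) :: xs else x :: pvIncFirst xs v

-- A's `[None]*n` tail is never read (the scan stops at j < i), so the port
-- carries only the already-assigned prefix and appends output[i] = A[i].
def solve (A : List Int) : List Int :=
  A.foldl (fun out a => pvIncFirst out a ++ [a]) []

-- ===== PORT B =====
-- Source B's loop body; `i` is the enumerate index (always = output length, kept as
-- Nat since list positions are nonnegative).  `idxs.erase j` ports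
-- `idxs.remove(j)` (j ∈ idxs there); `buckets.setdefault(k, []).append(x)`
-- ports as insert k (getD k [] ++ [x]).
def solveAltGo : List Int → Nat → List Int → PySem.Dict Int (List Nat) → List Int
  | [], _, out, _ => out
  | v :: rest, i, out, d =>
      let idxs := d.getD v []
      if idxs.isEmpty then
        solveAltGo rest (i+1) (out ++ [v]) (d.insert v (d.getD v [] ++ [i]))
      else
        let j := (PySem.List.min? idxs (fun x => x)).getD 0
        let out1 := out.set j (out.getD j 0 + 1)
        let d1 := (d.insert v (idxs.erase j)).insert (v+1) (d.getD (v+1) [] ++ [j])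
        solveAltGo rest (i+1) (out1 ++ [v]) (d1.insert v (d1.getD v [] ++ [i]))

def solve_alt (A : List Int) : List Int :=
  solveAltGo A 0 [] PySem.Dict.empty

-- ===== PRECONDITION & SPEC =====
def Spec_solve (A : List Int) (out : List Int) : Prop := out = solve_alt A
instance (A : List Int) (out : List Int) : Decidable (Spec_solve A out) := by unfold Spec_solve; infer_instance

-- ===== CLAIM (what is proved, stated in full; the proofs are below) =====
def Claim_equal_solve : Prop := ∀ (A : List Int), Dom_solve A → Spec_solve A (solve A)

-- ===== LEMMAS AND PROOFS =====

-- Invariant: each bucket is duplicate-free and holds exactly the positions of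
-- the current output whose entry equals the bucket's key.
def pvInv (out : List Int) (d : PySem.Dict Int (List Nat)) : Prop :=
  ∀ v : Int, (d.getD v []).Nodup ∧ ∀ j : Nat, j ∈ d.getD v [] ↔ out[j]? = some v

theorem pvIncFirst_of_none (out : List Int) (v : Int)
    (h : ∀ j : Nat, out[j]? ≠ some v) : pvIncFirst out v = out := by
  induction out with
  | nil => rfl
  | cons x xs ih =>
      have hx : x ≠ v := by
        intro hxv; exact h 0 (by simp [hxv])
      simp only [pvIncFirst, if_neg hx]
      rw [ih (fun j hj => h (j+1) (by simpa using hj))]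

theorem pvIncFirst_of_first (out : List Int) (v : Int) (j : Nat)
    (hj : out[j]? = some v) (hfirst : ∀ k : Nat, k < j → out[k]? ≠ some v) :
    pvIncFirst out v = out.set j (out.getD j 0 + 1) := by
  induction out generalizing j with
  | nil => simp at hj
  | cons x xs ih =>
      cases j with
      | zero =>
          simp at hj
          simp [pvIncFirst, hj, List.set]
      | succ k =>
          have hx : x ≠ v := by
            intro hxv; exact hfirst 0 (Nat.succ_pos k) (by simp [hxv])
          simp only [pvIncFirst, if_neg hx, List.set]
          have := ih k (by simpa using hj)
            (fun m hm h' => hfirst (m+1) (by omega) (by simpa using h'))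
          simp only [List.getElem?_cons_succ] at *
          rw [this]
          simp [List.getD]

theorem pvSnoc_getElem? (out : List Int) (v : Int) (k : Nat) :
    (out ++ [v])[k]? = if k = out.length then some v else out[k]? := by
  rcases Nat.lt_trichotomy k out.length with h | h | h
  · rw [List.getElem?_append_left h, if_neg (Nat.ne_of_lt h)]
  · subst h; simp
  · rw [if_neg (Nat.ne_of_gt h)]
    rw [List.getElem?_eq_none (Nat.le_of_lt h), List.getElem?_eq_none (by simp; omega)]

theorem pvGo_eq (rest : List Int) : ∀ (out : List Int) (d : PySem.Dict Int (List Nat)),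
    pvInv out d →
    solveAltGo rest out.length out d =
      rest.foldl (fun o a => pvIncFirst o a ++ [a]) out := by
  induction rest with
  | nil => intro out d _; rfl
  | cons v rest ih =>
      intro out d hInv
      simp only [solveAltGo, List.foldl_cons]
      by_cases hemp : (d.getD v []).isEmpty
      · -- no earlier entry equals v
        have hnone : ∀ j : Nat, out[j]? ≠ some v := by
          intro j hj
          have : j ∈ d.getD v [] := ((hInv v).2 j).mpr hj
          rw [List.isEmpty_iff.mp hemp] at this
          simp at this
        rw [if_pos hemp, pvIncFirst_of_none out v hnone]
        have hlen : (out ++ [v]).length = out.length + 1 := by simp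
        rw [← hlen]
        apply ih
        intro w
        have hw := hInv w
        by_cases hvw : w = v
        · subst hvw
          constructor
          · rw [PySem.Dict.getD_insert]
            simp [List.isEmpty_iff.mp hemp]
          · intro j
            rw [PySem.Dict.getD_insert, if_pos rfl, List.isEmpty_iff.mp hemp,
              pvSnoc_getElem?]
            simp only [List.nil_append, List.mem_singleton]
            constructor
            · intro hj; rw [if_pos hj]
            · intro hj
              by_cases hje : j = out.length
              · exact hje
              · rw [if_neg hje] at hj
                exact absurd hj (hnone j)
        · constructor
          · rw [PySem.Dict.getD_insert, if_neg hvw]; exact hw.1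
          · intro j
            rw [PySem.Dict.getD_insert, if_neg hvw, pvSnoc_getElem?]
            by_cases hje : j = out.length
            · subst hje
              rw [if_pos rfl]
              constructor
              · intro hj
                have := (hw.2 out.length).mp hj
                simp at this
              · intro hj
                exact absurd (Option.some.inj hj).symm hvw
            · rw [if_neg hje]; exact hw.2 j
      · -- an earlier entry equals v: it is the min of bucket v
        rw [if_neg hemp]
        obtain ⟨m, hm⟩ : ∃ m, PySem.List.min? (d.getD v []) (fun x => x) = some m := by
          cases hmin : PySem.List.min? (d.getD v []) (fun x => x) with
          | none =>
              rw [PySem.List.min?_eq_none_iff] at hmin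
              rw [hmin] at hemp; simp at hemp
          | some m => exact ⟨m, rfl⟩
        have hmmem : m ∈ d.getD v [] := PySem.List.min?_mem hm
        have hmout : out[m]? = some v := ((hInv v).2 m).mp hmmem
        have hmlt : m < out.length := by
          by_contra h
          rw [List.getElem?_eq_none (by omega)] at hmout; simp at hmout
        have hfirst : ∀ k : Nat, k < m → out[k]? ≠ some v := by
          intro k hk hkv
          have hkb : k ∈ d.getD v [] := ((hInv v).2 k).mpr hkv
          have := PySem.List.min?_isMin hm k hkb
          simp at this; omega
        simp only [hm, Option.getD_some]
        rw [pvIncFirst_of_first out v m hmout hfirst]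
        set out1 := out.set m (out.getD m 0 + 1) with hout1
        have hlen1 : out1.length = out.length := by simp [hout1]
        have hi : out.length + 1 = (out1 ++ [v]).length := by simp [hlen1]
        rw [hi]
        apply ih
        -- entries of the new output prefix
        have hmv : out.getD m 0 = v := by
          rw [List.getD_eq_getElem?_getD, hmout]; rfl
        have hget : ∀ j : Nat, (out1 ++ [v])[j]? =
            if j = out.length then some v
            else if j = m then some (v + 1) else out[j]? := by
          intro j
          rw [pvSnoc_getElem?, hlen1]
          by_cases hjn : j = out.length
          · simp [hjn]
          · rw [if_neg hjn, if_neg hjn, hout1]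
            by_cases hjm : j = m
            · subst hjm
              rw [if_pos rfl, List.getElem?_set_self (by omega), hmv]
            · rw [if_neg hjm, List.getElem?_set_ne (fun h => hjm h.symm)]
        have hbound : ∀ w : Int, ∀ j : Nat, j ∈ d.getD w [] → j < out.length := by
          intro w j hj
          have h2 := ((hInv w).2 j).mp hj
          by_contra h
          rw [List.getElem?_eq_none (by omega)] at h2; simp at h2
        have hsucc : v + 1 ≠ v := by omega
        have hdm : (((d.insert v ((d.getD v []).erase m)).insert (v+1)
              (d.getD (v+1) [] ++ [m]))).getD v [] = (d.getD v []).erase m := by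
          rw [PySem.Dict.getD_insert, if_neg hsucc.symm,
            PySem.Dict.getD_insert, if_pos rfl]
        rw [hdm]
        have hDget : ∀ w : Int,
            ((((d.insert v ((d.getD v []).erase m)).insert (v+1)
              (d.getD (v+1) [] ++ [m]))).insert v
              ((d.getD v []).erase m ++ [out.length])).getD w [] =
            if w = v then (d.getD v []).erase m ++ [out.length]
            else if w = v + 1 then d.getD (v+1) [] ++ [m]
            else d.getD w [] := by
          intro w
          rw [PySem.Dict.getD_insert]
          by_cases h1 : w = v
          · rw [if_pos h1, if_pos h1]
          · rw [if_neg h1, if_neg h1, PySem.Dict.getD_insert]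
            by_cases h2 : w = v + 1
            · rw [if_pos h2, if_pos h2]
            · rw [if_neg h2, if_neg h2, PySem.Dict.getD_insert, if_neg h1]
        intro w
        rw [hDget w]
        have hnd := (hInv v).1
        have hmem := (hInv v).2
        by_cases h1 : w = v
        · subst h1
          rw [if_pos rfl]
          constructor
          · -- Nodup of erase ++ [out.length]
            refine (hnd.erase m).append (by simp) ?_
            intro j hj hj2
            simp only [List.mem_singleton] at hj2
            have := hbound w j (List.mem_of_mem_erase hj)
            omega
          · intro j
            rw [hget j]
            by_cases hjn : j = out.length
            · simp [hjn]
            · rw [if_neg hjn]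
              by_cases hjm : j = m
              · subst hjm
                rw [if_pos rfl]
                simp only [List.mem_append, List.mem_singleton,
                  hnd.mem_erase_iff]
                constructor
                · intro h; rcases h with ⟨h, _⟩ | h
                  · exact absurd rfl h
                  · exact absurd h hjn
                · intro h
                  exact absurd (Option.some.inj h) (by omega)
              · rw [if_neg hjm]
                simp only [List.mem_append, List.mem_singleton,
                  hnd.mem_erase_iff]
                rw [← hmem j]
                constructor
                · intro h; rcases h with ⟨_, h⟩ | h
                  · exact h
                  · exact absurd h hjn
                · intro h; exact Or.inl ⟨hjm, h⟩
        · rw [if_neg h1]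
          by_cases h2 : w = v + 1
          · subst h2
            rw [if_pos rfl]
            have hold := (hInv (v+1)).2
            have hmold : m ∉ d.getD (v+1) [] := by
              intro h
              have := (hold m).mp h
              rw [hmout] at this
              exact hsucc (Option.some.inj this).symm
            constructor
            · refine ((hInv (v+1)).1).append (by simp) ?_
              intro j hj hj2
              simp only [List.mem_singleton] at hj2
              exact hmold (hj2 ▸ hj)
            · intro j
              rw [hget j]
              by_cases hjn : j = out.length
              · rw [if_pos hjn]
                simp only [List.mem_append, List.mem_singleton]
                constructor
                · intro h; rcases h with h | h
                  · have := hbound (v+1) j h; omega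
                  · omega
                · intro h; exact absurd (Option.some.inj h) (by omega)
              · rw [if_neg hjn]
                by_cases hjm : j = m
                · subst hjm
                  rw [if_pos rfl]
                  simp
                · rw [if_neg hjm]
                  simp only [List.mem_append, List.mem_singleton]
                  rw [← hold j]
                  constructor
                  · intro h; rcases h with h | h
                    · exact h
                    · exact absurd h hjm
                  · exact Or.inl
          · rw [if_neg h2]
            refine ⟨(hInv w).1, ?_⟩
            intro j
            rw [hget j]
            by_cases hjn : j = out.length
            · rw [if_pos hjn]
              constructor
              · intro h; have := hbound w j h; omega
              · intro h; exact absurd (Option.some.inj h).symm h1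
            · rw [if_neg hjn]
              by_cases hjm : j = m
              · rw [if_pos hjm]
                constructor
                · intro h
                  have := ((hInv w).2 j).mp h
                  rw [hjm, hmout] at this
                  exact absurd (Option.some.inj this).symm h1
                · intro h; exact absurd (Option.some.inj h).symm h2
              · rw [if_neg hjm]
                exact (hInv w).2 j


-- ===== VERDICT (by name: the statement is the Claim_ definition above) =====
theorem solve_spec : Claim_equal_solve := by
  intro A _
  unfold Spec_solve solve solve_alt
  have h0 : pvInv [] PySem.Dict.empty := by
    intro v
    constructor
    · simp [PySem.Dict.getD_empty]
    · intro j; simp [PySem.Dict.getD_empty]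
  simpa using (pvGo_eq A [] PySem.Dict.empty h0).symm
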